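-- pv_equiv track=rewrite | github.com/andy1li/codejam | Kickstart/2022/Round C/A. New Password/2022k-c-a.py | solve
-- ===== SOURCE A (Python) =====
-- def solve(n, password):
--     if not any(x.isupper() for x in password):
--         password += 'A'
--     if not any(x.islower() for x in password):
--         password += 'a'
--     if not any(x.isnumeric() for x in password):
--         password += '1'
--     if not any(x in '#@*&' for x in password):
--         password += '#'
--     if len(password) < 7:
--         password += '*' * (7 - len(password))
--
--     return password
-- ===== SOURCE B (Python) =====
-- # Table-driven: one OR-fold builds a 4-bit category mask; a precomputed
-- # 16-entry table gives the fix-up suffix; ljust pads to length 7.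
-- FIX = ((1, 'A'), (2, 'a'), (4, '1'), (8, '#'))
-- SUFFIX = [''.join(c for b, c in FIX if not m & b) for m in range(16)]
--
-- def _bit(x):
--     if x.isupper():
--         return 1
--     if x.islower():
--         return 2
--     if x.isnumeric():
--         return 4
--     if x in '#@*&':
--         return 8
--     return 0
--
-- def solve(n, password):
--     m = 0
--     for x in password:
--         m |= _bit(x)
--     return (password + SUFFIX[m]).ljust(7, '*')
-- ===== Notes on version B (the rewrite author's own statement) =====
-- stated objective: alternative
-- what changed: B replaces A's four separate any()-scans with conditional appends by a table-driven design: one OR-fold over the password builds a 4-bit category bitmask, a precomputed 16-entry table maps the mask directly to the fix-up suffix (no branching at use site), and str.ljust pads to length 7.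
import Mathlib
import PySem

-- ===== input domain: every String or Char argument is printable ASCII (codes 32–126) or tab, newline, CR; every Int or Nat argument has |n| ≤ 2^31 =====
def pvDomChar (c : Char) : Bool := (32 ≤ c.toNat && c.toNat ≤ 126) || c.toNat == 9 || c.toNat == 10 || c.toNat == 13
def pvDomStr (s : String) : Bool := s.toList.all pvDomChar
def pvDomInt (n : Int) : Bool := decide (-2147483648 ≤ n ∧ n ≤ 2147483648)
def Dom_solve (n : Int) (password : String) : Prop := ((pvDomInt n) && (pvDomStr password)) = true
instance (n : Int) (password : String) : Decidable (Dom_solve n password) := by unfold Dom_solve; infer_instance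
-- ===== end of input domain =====

-- B changes: a table-driven rewrite — one OR-fold builds a 4-bit category mask, a precomputed
-- 16-entry table gives the fix-up suffix, ljust pads; objective: alternative.
-- Char-level isupper/islower are exact on the printable-ASCII domain; x.isnumeric() coincides
-- with PySem.Chars.isdigit on Dom (they differ only outside ASCII).

-- ===== PORT A =====
def stepUpper (p : List Char) : List Char :=
  if !(p.any PySem.Chars.isupper) then p ++ ['A'] else p
def stepLower (p : List Char) : List Char :=
  if !(p.any PySem.Chars.islower) then p ++ ['a'] else p
def stepDigit (p : List Char) : List Char :=
  if !(p.any PySem.Chars.isdigit) then p ++ ['1'] else p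
def stepSpecial (p : List Char) : List Char :=
  if !(p.any (fun x => ("#@*&".toList).contains x)) then p ++ ['#'] else p
def stepPad (p : List Char) : List Char :=
  if p.length < 7 then p ++ List.replicate (7 - p.length) '*' else p

def solve (_n : Int) (password : String) : String :=
  String.ofList (stepPad (stepSpecial (stepDigit (stepLower (stepUpper password.toList)))))

-- ===== PORT B =====
-- _bit(x): the first matching category's bit, else 0
def bitOf (x : Char) : Nat :=
  if PySem.Chars.isupper x then 1
  else if PySem.Chars.islower x then 2
  else if PySem.Chars.isdigit x then 4
  else if ("#@*&".toList).contains x then 8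
  else 0

-- SUFFIX = [''.join(c for b, c in FIX if not m & b) for m in range(16)]
def suffixFor (m : Nat) : List Char :=
  ([(1, 'A'), (2, 'a'), (4, '1'), (8, '#')] : List (Nat × Char)).filterMap
    (fun p => if m &&& p.1 = 0 then some p.2 else none)

def suffixTable : List (List Char) := (List.range 16).map suffixFor

def solve_alt (_n : Int) (password : String) : String :=
  let m := password.toList.foldl (fun m x => m ||| bitOf x) 0
  let r := password.toList ++ suffixTable.getD m []
  -- (…).ljust(7, '*'): pad on the right with '*' up to length 7
  String.ofList (r ++ List.replicate (7 - r.length) '*')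

-- ===== PRECONDITION & SPEC =====
def Spec_solve (n : Int) (password : String) (out : String) : Prop := out = solve_alt n password
instance (n : Int) (password : String) (out : String) : Decidable (Spec_solve n password out) := by unfold Spec_solve; infer_instance

-- ===== CLAIM (what is proved, stated in full; the proofs are below) =====
def Claim_equal_solve : Prop := ∀ (n : Int) (password : String), Dom_solve n password → Spec_solve n password (solve n password)

-- ===== LEMMAS AND PROOFS =====
-- category bits as one number
def encode (u lo d s : Bool) : Nat :=
  (if u then 1 else 0) ||| (if lo then 2 else 0) ||| (if d then 4 else 0) ||| (if s then 8 else 0)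

theorem sp_toNat (c : Char) (h : ("#@*&".toList).contains c = true) :
    c.toNat = 35 ∨ c.toNat = 64 ∨ c.toNat = 42 ∨ c.toNat = 38 := by
  have hm : c = '#' ∨ c = '@' ∨ c = '*' ∨ c = '&' := by simpa using h
  rcases hm with rfl | rfl | rfl | rfl <;> simp

theorem upper_not_lower (c : Char) (h : PySem.Chars.isupper c = true) :
    PySem.Chars.islower c = false := by
  simp [PySem.Chars.isupper, PySem.Chars.islower, Char.le_def, UInt32.le_iff_toNat_le] at *
  omega

theorem upper_not_digit (c : Char) (h : PySem.Chars.isupper c = true) :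
    PySem.Chars.isdigit c = false := by
  simp [PySem.Chars.isupper, PySem.Chars.isdigit, Char.le_def, UInt32.le_iff_toNat_le] at *
  omega

theorem lower_not_digit (c : Char) (h : PySem.Chars.islower c = true) :
    PySem.Chars.isdigit c = false := by
  simp [PySem.Chars.islower, PySem.Chars.isdigit, Char.le_def, UInt32.le_iff_toNat_le] at *
  omega

theorem upper_not_sp (c : Char) (h : PySem.Chars.isupper c = true) :
    ("#@*&".toList).contains c = false := by
  cases hc : ("#@*&".toList).contains c with
  | false => rfl
  | true =>
    exfalso
    have h2 := sp_toNat c hc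
    simp [PySem.Chars.isupper, Char.le_def, UInt32.le_iff_toNat_le] at h
    omega

theorem lower_not_sp (c : Char) (h : PySem.Chars.islower c = true) :
    ("#@*&".toList).contains c = false := by
  cases hc : ("#@*&".toList).contains c with
  | false => rfl
  | true =>
    exfalso
    have h2 := sp_toNat c hc
    simp [PySem.Chars.islower, Char.le_def, UInt32.le_iff_toNat_le] at h
    omega

theorem digit_not_sp (c : Char) (h : PySem.Chars.isdigit c = true) :
    ("#@*&".toList).contains c = false := by
  cases hc : ("#@*&".toList).contains c with
  | false => rfl
  | true =>
    exfalso
    have h2 := sp_toNat c hc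
    simp [PySem.Chars.isdigit, Char.le_def, UInt32.le_iff_toNat_le] at h
    omega

theorem bit_encode (x : Char) (u lo d s : Bool) :
    encode u lo d s ||| bitOf x =
      encode (u || PySem.Chars.isupper x) (lo || PySem.Chars.islower x)
             (d || PySem.Chars.isdigit x) (s || ("#@*&".toList).contains x) := by
  unfold bitOf
  by_cases h1 : PySem.Chars.isupper x = true
  · rw [h1, upper_not_lower x h1, upper_not_digit x h1, upper_not_sp x h1]
    rcases u <;> rcases lo <;> rcases d <;> rcases s <;> decide
  · rw [Bool.not_eq_true] at h1
    by_cases h2 : PySem.Chars.islower x = true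
    · rw [h1, h2, lower_not_digit x h2, lower_not_sp x h2]
      rcases u <;> rcases lo <;> rcases d <;> rcases s <;> decide
    · rw [Bool.not_eq_true] at h2
      by_cases h3 : PySem.Chars.isdigit x = true
      · rw [h1, h2, h3, digit_not_sp x h3]
        rcases u <;> rcases lo <;> rcases d <;> rcases s <;> decide
      · rw [Bool.not_eq_true] at h3
        cases h4 : ("#@*&".toList).contains x with
        | true =>
          rw [h1, h2, h3]
          rcases u <;> rcases lo <;> rcases d <;> rcases s <;> decide
        | false =>
          rw [h1, h2, h3]
          rcases u <;> rcases lo <;> rcases d <;> rcases s <;> decide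

theorem mask_encode (xs : List Char) : ∀ (u lo d s : Bool),
    xs.foldl (fun m x => m ||| bitOf x) (encode u lo d s) =
      encode (u || xs.any PySem.Chars.isupper) (lo || xs.any PySem.Chars.islower)
             (d || xs.any PySem.Chars.isdigit)
             (s || xs.any (fun x => ("#@*&".toList).contains x)) := by
  induction xs with
  | nil => simp
  | cons x xs ih =>
    intro u lo d s
    simp only [List.foldl_cons, List.any_cons, bit_encode, ih, Bool.or_assoc]

theorem suffix_eq (u lo d s : Bool) :
    suffixTable.getD (encode u lo d s) [] =
      (if !u then ['A'] else []) ++ (if !lo then ['a'] else []) ++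
      (if !d then ['1'] else []) ++ (if !s then ['#'] else []) := by
  rcases u <;> rcases lo <;> rcases d <;> rcases s <;> decide

-- appending characters that all fail f does not change `any f`
theorem any_append_opt (p q : List Char) (f : Char → Bool) (h : q.any f = false) :
    (p ++ q).any f = p.any f := by
  simp [List.any_append, h]

theorem pad_eq (p : List Char) :
    (if p.length < 7 then p ++ List.replicate (7 - p.length) '*' else p) =
      p ++ List.replicate (7 - p.length) '*' := by
  split
  · rfl
  · have : 7 - p.length = 0 := by omega
    simp [this]

theorem step_append (p : List Char) (b : Bool) (c : Char) :
    (if !b then p ++ [c] else p) = p ++ (if !b then [c] else []) := by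
  split <;> simp

theorem solve_spec_aux (n : Int) (password : String) :
    solve n password = solve_alt n password := by
  simp only [solve, solve_alt]
  have hmask : password.toList.foldl (fun m x => m ||| bitOf x) 0 =
      encode (password.toList.any PySem.Chars.isupper) (password.toList.any PySem.Chars.islower)
             (password.toList.any PySem.Chars.isdigit)
             (password.toList.any (fun x => ("#@*&".toList).contains x)) := by
    have h0 : (0 : Nat) = encode false false false false := by decide
    rw [h0, mask_encode]
    simp
  rw [hmask, suffix_eq]
  set xs := password.toList with hxs
  set i1 : List Char := if !(xs.any PySem.Chars.isupper) then ['A'] else [] with hi1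
  set i2 : List Char := if !(xs.any PySem.Chars.islower) then ['a'] else [] with hi2
  set i3 : List Char := if !(xs.any PySem.Chars.isdigit) then ['1'] else [] with hi3
  set i4 : List Char := if !(xs.any (fun x => ("#@*&".toList).contains x)) then ['#'] else [] with hi4
  have h1 : stepUpper xs = xs ++ i1 := by rw [stepUpper, hi1, step_append]
  have a2 : (xs ++ i1).any PySem.Chars.islower = xs.any PySem.Chars.islower := by
    apply any_append_opt; rw [hi1]; split <;> decide
  have h2 : stepLower (xs ++ i1) = xs ++ i1 ++ i2 := by
    rw [stepLower, a2, hi2, step_append]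
  have a3 : (xs ++ i1 ++ i2).any PySem.Chars.isdigit = xs.any PySem.Chars.isdigit := by
    rw [List.append_assoc]; apply any_append_opt
    rw [hi1, hi2]; split <;> split <;> decide
  have h3 : stepDigit (xs ++ i1 ++ i2) = xs ++ i1 ++ i2 ++ i3 := by
    rw [stepDigit, a3, hi3, step_append]
  have a4 : (xs ++ i1 ++ i2 ++ i3).any (fun x => ("#@*&".toList).contains x)
      = xs.any (fun x => ("#@*&".toList).contains x) := by
    rw [List.append_assoc, List.append_assoc]; apply any_append_opt
    rw [hi1, hi2, hi3]; split <;> split <;> split <;> decide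
  have h4 : stepSpecial (xs ++ i1 ++ i2 ++ i3) = xs ++ i1 ++ i2 ++ i3 ++ i4 := by
    rw [stepSpecial, a4, hi4, step_append]
  rw [h1, h2, h3, h4, stepPad, pad_eq]
  simp [List.append_assoc]

-- ===== VERDICT (by name: the statement is the Claim_ definition above) =====
theorem solve_spec : Claim_equal_solve := by
  intro n password _
  unfold Spec_solve
  exact solve_spec_aux n password
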